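-- pv_equiv track=rewrite | github.com/baptistecottier/advents-of-code | events/year_2022/day_11/day_11.py | monkey_business
-- ===== SOURCE A (Python) =====
-- from math import prod
--
-- def apply_operation(op_type: str, value: int, worry_level: int) -> int:
--     """Apply the operation to worry level based on operation type."""
--     if op_type == 'square':
--         return worry_level ** 2
--     if op_type == 'multiply':
--         return worry_level * value
--     if op_type == 'add':
--         return worry_level + value
--     raise ValueError(f"Unknown operation: {op_type}")
--
-- def monkey_business(
--         items: list[tuple[int, int]],
--         operations: list[tuple[str, int]],
--         tests: list[tuple[int, ...]],
--         rounds: int,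
--         worry_level_div: int) -> int:
--     """
--     Simulates a monkey business process over a number of rounds, applying functions and tests to
--     items, and returns the product of the two highest inspection counts.
--     """
--     modulo = prod([mod for mod, _, _ in tests])
--     inspected_items = [0 for _ in operations]
--
--     for old, new_monkey in items:
--         for _ in range(rounds):
--             old_monkey = 0
--             while new_monkey >= old_monkey:
--                 op_type, value = operations[new_monkey]
--                 pred = tests[new_monkey]
--                 inspected_items[new_monkey] += 1
--                 new_worry = apply_operation(op_type, value, old)
--                 old = (new_worry // worry_level_div) % (worry_level_div * modulo)
--                 old_monkey, new_monkey = new_monkey, pred[1 + (old % pred[0] != 0)]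
--
--     return prod(sorted(inspected_items)[-2:])
-- ===== SOURCE B (Python) =====
-- from math import prod
--
-- def monkey_business(items, operations, tests, rounds, worry_level_div):
--     """Round-major simulation over a vector of item states, tallying hits per round."""
--     modulo = prod(t[0] for t in tests)
--     limit = worry_level_div * modulo
--     counts = [0] * len(operations)
--     state = list(items)
--     for _ in range(rounds):
--         next_state = []
--         hits = []
--         for worry, monkey in state:
--             previous = 0
--             while monkey >= previous:
--                 hits.append(monkey)
--                 op_type, value = operations[monkey]
--                 if op_type == 'square':
--                     worry = worry * worry
--                 elif op_type == 'multiply':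
--                     worry = worry * value
--                 elif op_type == 'add':
--                     worry = worry + value
--                 else:
--                     raise ValueError(f"Unknown operation: {op_type}")
--                 worry = (worry // worry_level_div) % limit
--                 test = tests[monkey]
--                 previous, monkey = monkey, (test[1] if worry % test[0] == 0 else test[2])
--             next_state.append((worry, monkey))
--         state = next_state
--         counts = [c + hits.count(i) for i, c in enumerate(counts)]
--     top = sorted(counts, reverse=True)
--     return prod(top[:2])
-- ===== Notes on version B (the rewrite author's own statement) =====
-- stated objective: alternative
-- what changed: A simulates item-major (each item pushed through all rounds on its own, mutating a shared inspection list); B simulates round-major over a vector of item states, collecting each round's hit list and tallying it into the counts in one comprehension, then takes the top two via a descending sort. …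
-- outside the precondition, e.g. on monkey_business([(1, 0)], [('add', 1), ('add', 1)], [(2, 0, 1), (3, 0, 0)], 1, 1): A returns 2, B returns 2; on monkey_business([(1, -1)], [('x', 1)], [(3, 0, 0)], 2, 5): A returns 0, B returns 0
import Mathlib
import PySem

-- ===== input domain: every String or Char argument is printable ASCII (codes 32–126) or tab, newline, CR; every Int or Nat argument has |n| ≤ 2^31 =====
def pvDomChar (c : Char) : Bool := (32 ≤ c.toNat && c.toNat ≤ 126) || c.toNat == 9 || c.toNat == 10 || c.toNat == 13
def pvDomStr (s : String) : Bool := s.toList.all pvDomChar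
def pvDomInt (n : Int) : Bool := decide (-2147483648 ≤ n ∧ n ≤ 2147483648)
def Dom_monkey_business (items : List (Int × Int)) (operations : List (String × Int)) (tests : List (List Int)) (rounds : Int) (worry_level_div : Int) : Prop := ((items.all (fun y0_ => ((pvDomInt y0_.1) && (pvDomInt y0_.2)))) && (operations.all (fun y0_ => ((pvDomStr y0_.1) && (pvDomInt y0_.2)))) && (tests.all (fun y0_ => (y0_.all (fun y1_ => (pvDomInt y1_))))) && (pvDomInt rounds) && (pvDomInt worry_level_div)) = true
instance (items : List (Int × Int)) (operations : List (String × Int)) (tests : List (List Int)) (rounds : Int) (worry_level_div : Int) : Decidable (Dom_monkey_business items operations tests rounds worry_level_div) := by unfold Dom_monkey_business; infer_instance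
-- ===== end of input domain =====

-- B replaces A's item-major simulation by a round-major one over a vector of item states
-- (per-round hit tally, descending sort for the top two); equivalence of the return value is proved on Pre_.

-- ===== PORT A =====

def apply_operation (op_type : String) (value : Int) (worry_level : Int) : Int :=
  if op_type = "square" then worry_level ^ 2
  else if op_type = "multiply" then worry_level * value
  else if op_type = "add" then worry_level + value
  else 0  -- Python: raise ValueError (excluded by Pre_)

-- the inner `while new_monkey >= old_monkey` loop of A; fuel is only a termination guard
-- (under Pre_ the visited monkeys strictly increase, so fuel `len(operations)+1` is never exhausted)
def mbWhile (operations : List (String × Int)) (tests : List (List Int))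
    (worry_level_div modulo : Int) :
    Nat → Int → Int → Int → List Int → Int × Int × List Int
  | 0, _, new_monkey, old, insp => (old, new_monkey, insp)
  | fuel+1, old_monkey, new_monkey, old, insp =>
    if old_monkey ≤ new_monkey then
      let opv := PySem.List.pyGetD operations new_monkey ("", 0)
      let pred := PySem.List.pyGetD tests new_monkey []
      let insp' := PySem.List.pySetD insp new_monkey (PySem.List.pyGetD insp new_monkey 0 + 1)
      let new_worry := apply_operation opv.1 opv.2 old
      let old' := PySem.Int.mod (PySem.Int.floordiv new_worry worry_level_div) (worry_level_div * modulo)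
      let nm := PySem.List.pyGetD pred (1 + (if PySem.Int.mod old' (PySem.List.pyGetD pred 0 0) ≠ 0 then 1 else 0)) 0
      mbWhile operations tests worry_level_div modulo fuel new_monkey nm old' insp'
    else (old, new_monkey, insp)

def monkey_business (items : List (Int × Int)) (operations : List (String × Int)) (tests : List (List Int)) (rounds : Int) (worry_level_div : Int) : Int :=
  let modulo := (tests.map (fun t => PySem.List.pyGetD t 0 0)).prod  -- [mod for mod,_,_ in tests] (unpack needs len 3: Pre_)
  let inspected0 := operations.map (fun _ => (0 : Int))
  let insp := items.foldl (fun insp wm =>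
      ((PySem.List.pyRange 0 rounds 1).foldl
        (fun (s : Int × Int × List Int) _ =>
          mbWhile operations tests worry_level_div modulo (operations.length + 1) 0 s.2.1 s.1 s.2.2)
        (wm.1, wm.2, insp)).2.2)
    inspected0
  (PySem.List.slice (PySem.List.sorted insp (fun x => x) false) (some (-2)) none).prod

-- ===== PORT B =====

-- one item's throw chain within a single round: returns (worry, monkey, hits); fuel as in mbWhile
def mbChain (operations : List (String × Int)) (tests : List (List Int))
    (worry_level_div limit : Int) :
    Nat → Int → Int → Int → Int × Int × List Int
  | 0, _, monkey, worry => (worry, monkey, [])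
  | fuel+1, previous, monkey, worry =>
    if previous ≤ monkey then
      let opv := PySem.List.pyGetD operations monkey ("", 0)
      let w1 := if opv.1 = "square" then worry * worry
        else if opv.1 = "multiply" then worry * opv.2
        else if opv.1 = "add" then worry + opv.2
        else 0  -- Python: raise ValueError (excluded by Pre_)
      let w2 := PySem.Int.mod (PySem.Int.floordiv w1 worry_level_div) limit
      let test := PySem.List.pyGetD tests monkey []
      let nm := if PySem.Int.mod w2 (PySem.List.pyGetD test 0 0) = 0
        then PySem.List.pyGetD test 1 0 else PySem.List.pyGetD test 2 0
      let r := mbChain operations tests worry_level_div limit fuel monkey nm w2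
      (r.1, r.2.1, monkey :: r.2.2)
    else (worry, monkey, [])

def monkey_business_alt (items : List (Int × Int)) (operations : List (String × Int)) (tests : List (List Int)) (rounds : Int) (worry_level_div : Int) : Int :=
  let modulo := (tests.map (fun t => PySem.List.pyGetD t 0 0)).prod
  let limit := worry_level_div * modulo
  let counts0 := PySem.List.pyRepeat [(0 : Int)] (operations.length : Int)
  let final := (PySem.List.pyRange 0 rounds 1).foldl
    (fun (sc : List (Int × Int) × List Int) _ =>
      let st := sc.1.foldl
        (fun (acc : List (Int × Int) × List Int) wm =>
          let r := mbChain operations tests worry_level_div limit (operations.length + 1) 0 wm.2 wm.1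
          (acc.1 ++ [(r.1, r.2.1)], acc.2 ++ r.2.2))
        ([], [])
      (st.1, (PySem.List.enumerate sc.2 0).map (fun ic => ic.2 + (st.2.count ic.1 : Int))))
    (items, counts0)
  let top := PySem.List.sorted final.2 (fun x => x) true
  (PySem.List.slice top none (some 2)).prod

-- ===== PRECONDITION & SPEC =====

-- Pre_ = configurations on which A terminates and raises nothing: every test row has length 3, and
-- (unless there is nothing to simulate) the divisor is nonzero, every operation name is known, every
-- test divisor is nonzero, every throw target is in range and never the throwing monkey itself
-- (self-targets can make A diverge, and which monkeys are actually reached is not closed-form), and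
-- every item starts on an existing monkey (or a negative index, which A silently skips).
def Pre_monkey_business (items : List (Int × Int)) (operations : List (String × Int)) (tests : List (List Int)) (rounds : Int) (worry_level_div : Int) : Prop :=
  (∀ t ∈ tests, t.length = 3) ∧
  (items = [] ∨ rounds ≤ 0 ∨
    (worry_level_div ≠ 0 ∧
     (∀ op ∈ operations, op.1 = "square" ∨ op.1 = "multiply" ∨ op.1 = "add") ∧
     (∀ p ∈ PySem.List.enumerate tests 0,
        p.2.getD 0 0 ≠ 0 ∧
        (p.2.getD 1 0 < p.1 ∨ (p.1 < p.2.getD 1 0 ∧ p.2.getD 1 0 < (min operations.length tests.length : Int))) ∧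
        (p.2.getD 2 0 < p.1 ∨ (p.1 < p.2.getD 2 0 ∧ p.2.getD 2 0 < (min operations.length tests.length : Int)))) ∧
     (∀ wm ∈ items, 0 ≤ wm.2 → wm.2 < (min operations.length tests.length : Int))))
instance (items : List (Int × Int)) (operations : List (String × Int)) (tests : List (List Int)) (rounds : Int) (worry_level_div : Int) : Decidable (Pre_monkey_business items operations tests rounds worry_level_div) := by unfold Pre_monkey_business; infer_instance

def pvWitness_monkey_business : (List (Int × Int)) × (List (String × Int)) × List (List Int) × Int × Int :=
  ([(1, 0)], [("add", 1), ("add", 1)], [[2, 1, 1], [3, 0, 0]], 2, 3)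

def Spec_monkey_business (items : List (Int × Int)) (operations : List (String × Int)) (tests : List (List Int)) (rounds : Int) (worry_level_div : Int) (out : Int) : Prop := out = monkey_business_alt items operations tests rounds worry_level_div
instance (items : List (Int × Int)) (operations : List (String × Int)) (tests : List (List Int)) (rounds : Int) (worry_level_div : Int) (out : Int) : Decidable (Spec_monkey_business items operations tests rounds worry_level_div out) := by unfold Spec_monkey_business; infer_instance

-- ===== CLAIM (what is proved, stated in full; the proofs are below) =====
def Claim_equal_monkey_business : Prop := ∀ (items : List (Int × Int)) (operations : List (String × Int)) (tests : List (List Int)) (rounds : Int) (worry_level_div : Int), Dom_monkey_business items operations tests rounds worry_level_div → Pre_monkey_business items operations tests rounds worry_level_div → Spec_monkey_business items operations tests rounds worry_level_div (monkey_business items operations tests rounds worry_level_div)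

-- ===== LEMMAS AND PROOFS =====

def pvBump (c : List Int) (h : Int) : List Int :=
  PySem.List.pySetD c h (PySem.List.pyGetD c h 0 + 1)

def pvStep (ops : List (String × Int)) (tests : List (List Int)) (wld md : Int) (s : Int × Int) : Int × Int :=
  ((mbChain ops tests wld (wld * md) (ops.length + 1) 0 s.2 s.1).1,
   (mbChain ops tests wld (wld * md) (ops.length + 1) 0 s.2 s.1).2.1)

def pvVis (ops : List (String × Int)) (tests : List (List Int)) (wld md : Int) (s : Int × Int) : List Int :=
  (mbChain ops tests wld (wld * md) (ops.length + 1) 0 s.2 s.1).2.2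

def pvHits (ops : List (String × Int)) (tests : List (List Int)) (wld md : Int) : Nat → (Int × Int) → List Int
  | 0, _ => []
  | n+1, s => pvVis ops tests wld md s ++ pvHits ops tests wld md n (pvStep ops tests wld md s)

def pvBH (ops : List (String × Int)) (tests : List (List Int)) (wld md : Int) : Nat → List (Int × Int) → List Int
  | 0, _ => []
  | n+1, S => S.flatMap (pvVis ops tests wld md) ++ pvBH ops tests wld md n (S.map (pvStep ops tests wld md))

def pvIterS (ops : List (String × Int)) (tests : List (List Int)) (wld md : Int) : Nat → (Int × Int) → (Int × Int)
  | 0, s => s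
  | n+1, s => pvIterS ops tests wld md n (pvStep ops tests wld md s)

def pvIterL (ops : List (String × Int)) (tests : List (List Int)) (wld md : Int) : Nat → List (Int × Int) → List (Int × Int)
  | 0, S => S
  | n+1, S => pvIterL ops tests wld md n (S.map (pvStep ops tests wld md))

theorem pv_apply_eq (op : String) (v w : Int) :
    apply_operation op v w =
      (if op = "square" then w * w
       else if op = "multiply" then w * v
       else if op = "add" then w + v else 0) := by
  unfold apply_operation; split_ifs <;> ring

theorem pv_target_eq (pred : List Int) (x : Int) :
    PySem.List.pyGetD pred (1 + (if PySem.Int.mod x (PySem.List.pyGetD pred 0 0) ≠ 0 then 1 else 0)) 0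
      = (if PySem.Int.mod x (PySem.List.pyGetD pred 0 0) = 0
         then PySem.List.pyGetD pred 1 0 else PySem.List.pyGetD pred 2 0) := by
  by_cases h : PySem.Int.mod x (PySem.List.pyGetD pred 0 0) = 0 <;> simp [h]

theorem pv_chain_while (ops : List (String × Int)) (tests : List (List Int)) (wld md : Int) :
    ∀ (f : Nat) (prev m w : Int) (insp : List Int),
      mbWhile ops tests wld md f prev m w insp =
        ((mbChain ops tests wld (wld * md) f prev m w).1,
         (mbChain ops tests wld (wld * md) f prev m w).2.1,
         (mbChain ops tests wld (wld * md) f prev m w).2.2.foldl pvBump insp) := by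
  intro f
  induction f with
  | zero => intro prev m w insp; rfl
  | succ f ih =>
    intro prev m w insp
    by_cases h : prev ≤ m
    · simp only [mbWhile, mbChain, if_pos h, pv_apply_eq, pv_target_eq]
      rw [ih]
      rfl
    · simp only [mbWhile, mbChain, if_neg h, List.foldl_nil]


theorem pv_item_rounds (ops : List (String × Int)) (tests : List (List Int)) (wld md : Int) :
    ∀ (l : List Int) (s : Int × Int) (insp : List Int),
      l.foldl (fun (st : Int × Int × List Int) _ =>
          mbWhile ops tests wld md (ops.length + 1) 0 st.2.1 st.1 st.2.2) (s.1, s.2, insp)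
        = ((pvIterS ops tests wld md l.length s).1, (pvIterS ops tests wld md l.length s).2,
           (pvHits ops tests wld md l.length s).foldl pvBump insp) := by
  intro l
  induction l with
  | nil => intro s insp; rfl
  | cons a l ih =>
    intro s insp
    simp only [List.foldl_cons, List.length_cons]
    rw [pv_chain_while]
    have : ((mbChain ops tests wld (wld * md) (ops.length + 1) 0 s.2 s.1).1,
            (mbChain ops tests wld (wld * md) (ops.length + 1) 0 s.2 s.1).2.1,
            (mbChain ops tests wld (wld * md) (ops.length + 1) 0 s.2 s.1).2.2.foldl pvBump insp)
         = ((pvStep ops tests wld md s).1, (pvStep ops tests wld md s).2,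
            (pvVis ops tests wld md s).foldl pvBump insp) := rfl
    rw [this, ih]
    simp only [pvHits, pvIterS, List.foldl_append]

theorem pv_foldl_flatMap_bump {α : Type} (g : α → List Int) :
    ∀ (L : List α) (c : List Int),
      L.foldl (fun c x => (g x).foldl pvBump c) c = (L.flatMap g).foldl pvBump c := by
  intro L
  induction L with
  | nil => intro c; rfl
  | cons a L ih => intro c; simp only [List.foldl_cons, List.flatMap_cons, List.foldl_append, ih]

theorem pv_A_insp (ops : List (String × Int)) (tests : List (List Int)) (wld md : Int)
    (l : List Int) (items : List (Int × Int)) (c : List Int) :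
    items.foldl (fun insp wm =>
        (l.foldl (fun (st : Int × Int × List Int) _ =>
            mbWhile ops tests wld md (ops.length + 1) 0 st.2.1 st.1 st.2.2) (wm.1, wm.2, insp)).2.2) c
      = (items.flatMap (pvHits ops tests wld md l.length)).foldl pvBump c := by
  rw [← pv_foldl_flatMap_bump]
  simp only [pv_item_rounds]

theorem pv_B_inner (ops : List (String × Int)) (tests : List (List Int)) (wld md : Int) :
    ∀ (S : List (Int × Int)) (L0 : List (Int × Int)) (H0 : List Int),
      S.foldl (fun (acc : List (Int × Int) × List Int) wm =>
          (acc.1 ++ [((mbChain ops tests wld (wld * md) (ops.length + 1) 0 wm.2 wm.1).1,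
                      (mbChain ops tests wld (wld * md) (ops.length + 1) 0 wm.2 wm.1).2.1)],
           acc.2 ++ (mbChain ops tests wld (wld * md) (ops.length + 1) 0 wm.2 wm.1).2.2)) (L0, H0)
        = (L0 ++ S.map (pvStep ops tests wld md), H0 ++ S.flatMap (pvVis ops tests wld md)) := by
  intro S
  induction S with
  | nil => intro L0 H0; simp
  | cons a S ih =>
    intro L0 H0
    simp only [List.foldl_cons, List.map_cons, List.flatMap_cons]
    rw [ih]
    simp [pvStep, pvVis]


theorem pv_bump_length (c : List Int) (x : Int) : (pvBump c x).length = c.length := by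
  simp [pvBump, PySem.List.length_pySetD]

theorem pv_bump_foldl_length : ∀ (hs : List Int) (c : List Int),
    (hs.foldl pvBump c).length = c.length := by
  intro hs
  induction hs with
  | nil => intro c; rfl
  | cons a hs ih => intro c; simp only [List.foldl_cons, ih, pv_bump_length]

theorem pv_bump_getD (c : List Int) (x : Int) (hx0 : 0 ≤ x) (hxl : x < (c.length : Int))
    (i : Nat) (hi : i < c.length) :
    (pvBump c x).getD i 0 = c.getD i 0 + (if (i : Int) = x then 1 else 0) := by
  have hxn : x.toNat < c.length := by omega
  have hset : pvBump c x = c.set x.toNat (c.getD x.toNat 0 + 1) := by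
    rw [pvBump, PySem.List.pySetD_of_nonneg c _ hx0]
    rw [PySem.List.pyGetD_eq_getElem c 0 hx0 hxl]
    rw [List.getD_eq_getElem c 0 hxn]
  rw [hset]
  rcases eq_or_ne (i : Int) x with hix | hix
  · have hxi : x.toNat = i := by omega
    subst hxi
    simp [List.getD_eq_getElem?_getD, hxn, hx0]
  · have hxi : x.toNat ≠ i := by omega
    simp [List.getD_eq_getElem?_getD, List.getElem?_set_ne hxi, hix]

theorem pv_bump_foldl_getD : ∀ (hs : List Int) (c : List Int)
    (_ : ∀ x ∈ hs, 0 ≤ x ∧ x < (c.length : Int)) (i : Nat) (_ : i < c.length),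
    (hs.foldl pvBump c).getD i 0 = c.getD i 0 + (hs.count (i : Int) : Int) := by
  intro hs
  induction hs with
  | nil => intro c hr i hi; simp
  | cons a hs ih =>
    intro c hr i hi
    have ha := hr a List.mem_cons_self
    have hr' : ∀ x ∈ hs, 0 ≤ x ∧ x < ((pvBump c a).length : Int) := by
      intro x hx; rw [pv_bump_length]; exact hr x (List.mem_cons_of_mem _ hx)
    have hi' : i < (pvBump c a).length := by rw [pv_bump_length]; exact hi
    simp only [List.foldl_cons]
    rw [ih (pvBump c a) hr' i hi', pv_bump_getD c a ha.1 ha.2 i hi, List.count_cons]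
    by_cases hia : (i : Int) = a <;> simp [hia] <;> omega

theorem pv_getD_ext (l1 l2 : List Int) (hlen : l1.length = l2.length)
    (h : ∀ i < l1.length, l1.getD i 0 = l2.getD i 0) : l1 = l2 := by
  apply List.ext_getElem hlen
  intro i h1 h2
  have := h i h1
  rwa [List.getD_eq_getElem l1 0 h1, List.getD_eq_getElem l2 0 h2] at this

theorem pv_bump_perm (hs1 hs2 c : List Int) (hperm : hs1.Perm hs2)
    (hr : ∀ x ∈ hs1, 0 ≤ x ∧ x < (c.length : Int)) :
    hs1.foldl pvBump c = hs2.foldl pvBump c := by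
  have hr2 : ∀ x ∈ hs2, 0 ≤ x ∧ x < (c.length : Int) := by
    intro x hx; exact hr x (hperm.mem_iff.2 hx)
  apply pv_getD_ext
  · rw [pv_bump_foldl_length, pv_bump_foldl_length]
  · intro i hi
    have hi' : i < c.length := by rwa [pv_bump_foldl_length] at hi
    rw [pv_bump_foldl_getD hs1 c hr i hi', pv_bump_foldl_getD hs2 c hr2 i hi',
      hperm.count_eq]

theorem pv_countMap_eq_bump (hs c : List Int)
    (hr : ∀ x ∈ hs, 0 ≤ x ∧ x < (c.length : Int)) :
    (PySem.List.enumerate c 0).map (fun ic => ic.2 + (hs.count ic.1 : Int))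
      = hs.foldl pvBump c := by
  apply pv_getD_ext
  · simp [PySem.List.length_enumerate, pv_bump_foldl_length]
  · intro i hi
    have hi' : i < c.length := by
      simpa [PySem.List.length_enumerate] using hi
    have hie : i < (PySem.List.enumerate c 0).length := by
      rwa [PySem.List.length_enumerate]
    rw [pv_bump_foldl_getD hs c hr i hi']
    rw [List.getD_eq_getElem _ 0 (by simpa [PySem.List.length_enumerate] using hi')]
    rw [List.getElem_map, PySem.List.getElem_enumerate c 0 i hie,
      List.getD_eq_getElem c 0 hi']
    simp


theorem pv_chain_range (ops : List (String × Int)) (tests : List (List Int)) (wld lim : Int)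
    (hT : ∀ p ∈ PySem.List.enumerate tests 0,
        p.2.getD 0 0 ≠ 0 ∧
        (p.2.getD 1 0 < p.1 ∨ (p.1 < p.2.getD 1 0 ∧ p.2.getD 1 0 < (min ops.length tests.length : Int))) ∧
        (p.2.getD 2 0 < p.1 ∨ (p.1 < p.2.getD 2 0 ∧ p.2.getD 2 0 < (min ops.length tests.length : Int)))) :
    ∀ (f : Nat) (prev m w : Int), 0 ≤ prev → (0 ≤ m → m < (min ops.length tests.length : Int)) →
      (∀ h ∈ (mbChain ops tests wld lim f prev m w).2.2, 0 ≤ h ∧ h < (min ops.length tests.length : Int)) ∧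
      (0 ≤ (mbChain ops tests wld lim f prev m w).2.1 →
        (mbChain ops tests wld lim f prev m w).2.1 < (min ops.length tests.length : Int)) := by
  intro f
  induction f with
  | zero =>
    intro prev m w hprev hm
    exact ⟨by intro h hh; simp [mbChain] at hh, by simpa [mbChain] using hm⟩
  | succ f ih =>
    intro prev m w hprev hm
    by_cases hpm : prev ≤ m
    · have hm0 : 0 ≤ m := le_trans hprev hpm
      have hmN : m < (min ops.length tests.length : Int) := hm hm0
      have hmt : m < (tests.length : Int) := by omega
      have hmtn : m.toNat < tests.length := by omega
      have htest : PySem.List.pyGetD tests m [] = tests[m.toNat] :=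
        PySem.List.pyGetD_eq_getElem tests [] hm0 hmt
      have hmem : ((m : Int), tests[m.toNat]) ∈ PySem.List.enumerate tests 0 := by
        rw [PySem.List.mem_enumerate_iff]
        refine ⟨m.toNat, hmtn, ?_⟩
        have : (0 : Int) + (m.toNat : Int) = m := by omega
        rw [this]
      obtain ⟨-, ht1, ht2⟩ := hT _ hmem
      have e1 : PySem.List.pyGetD (tests[m.toNat]) (1 : Int) 0 = (tests[m.toNat]).getD 1 0 := by
        have := PySem.List.pyGetD_natCast (tests[m.toNat]) 1 0; simpa using this
      have e2 : PySem.List.pyGetD (tests[m.toNat]) (2 : Int) 0 = (tests[m.toNat]).getD 2 0 := by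
        have := PySem.List.pyGetD_natCast (tests[m.toNat]) 2 0; simpa using this
      simp only [mbChain, if_pos hpm, htest, e1, e2]
      set w2 := PySem.Int.mod (PySem.Int.floordiv
        (if (PySem.List.pyGetD ops m ("", 0)).1 = "square" then w * w
         else if (PySem.List.pyGetD ops m ("", 0)).1 = "multiply" then w * (PySem.List.pyGetD ops m ("", 0)).2
         else if (PySem.List.pyGetD ops m ("", 0)).1 = "add" then w + (PySem.List.pyGetD ops m ("", 0)).2
         else 0) wld) lim with hw2
      set nm := (if PySem.Int.mod w2 (PySem.List.pyGetD (tests[m.toNat]) 0 0) = 0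
        then (tests[m.toNat]).getD 1 0 else (tests[m.toNat]).getD 2 0) with hnm
      have hnmr : 0 ≤ nm → nm < (min ops.length tests.length : Int) := by
        intro h0
        rw [hnm]
        split
        · rcases ht1 with h | h <;> simp at h ⊢ <;> omega
        · rcases ht2 with h | h <;> simp at h ⊢ <;> omega
      have := ih m nm w2 hm0 hnmr
      refine ⟨?_, this.2⟩
      intro h hh
      simp only [List.mem_cons] at hh
      rcases hh with rfl | hh
      · exact ⟨hm0, hmN⟩
      · exact this.1 h hh
    · exact ⟨by intro h hh; simp [mbChain, hpm] at hh, by simpa [mbChain, hpm] using hm⟩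


theorem pv_flat_range (ops : List (String × Int)) (tests : List (List Int)) (wld md : Int)
    (hT : ∀ p ∈ PySem.List.enumerate tests 0,
        p.2.getD 0 0 ≠ 0 ∧
        (p.2.getD 1 0 < p.1 ∨ (p.1 < p.2.getD 1 0 ∧ p.2.getD 1 0 < (min ops.length tests.length : Int))) ∧
        (p.2.getD 2 0 < p.1 ∨ (p.1 < p.2.getD 2 0 ∧ p.2.getD 2 0 < (min ops.length tests.length : Int))))
    (S : List (Int × Int)) (hS : ∀ s ∈ S, 0 ≤ s.2 → s.2 < (min ops.length tests.length : Int)) :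
    ∀ h ∈ S.flatMap (pvVis ops tests wld md), 0 ≤ h ∧ h < (min ops.length tests.length : Int) := by
  intro h hh
  rw [List.mem_flatMap] at hh
  obtain ⟨s, hs, hv⟩ := hh
  exact (pv_chain_range ops tests wld (wld * md) hT (ops.length + 1) 0 s.2 s.1 le_rfl (hS s hs)).1 h hv

theorem pv_step_range (ops : List (String × Int)) (tests : List (List Int)) (wld md : Int)
    (hT : ∀ p ∈ PySem.List.enumerate tests 0,
        p.2.getD 0 0 ≠ 0 ∧
        (p.2.getD 1 0 < p.1 ∨ (p.1 < p.2.getD 1 0 ∧ p.2.getD 1 0 < (min ops.length tests.length : Int))) ∧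
        (p.2.getD 2 0 < p.1 ∨ (p.1 < p.2.getD 2 0 ∧ p.2.getD 2 0 < (min ops.length tests.length : Int))))
    (S : List (Int × Int)) (hS : ∀ s ∈ S, 0 ≤ s.2 → s.2 < (min ops.length tests.length : Int)) :
    ∀ s ∈ S.map (pvStep ops tests wld md), 0 ≤ s.2 → s.2 < (min ops.length tests.length : Int) := by
  intro s hs
  rw [List.mem_map] at hs
  obtain ⟨t, ht, rfl⟩ := hs
  exact (pv_chain_range ops tests wld (wld * md) hT (ops.length + 1) 0 t.2 t.1 le_rfl (hS t ht)).2

theorem pv_BH_perm (ops : List (String × Int)) (tests : List (List Int)) (wld md : Int) :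
    ∀ (n : Nat) (S : List (Int × Int)),
      (pvBH ops tests wld md n S).Perm (S.flatMap (pvHits ops tests wld md n)) := by
  intro n
  induction n with
  | zero => intro S; simp [pvBH, pvHits]
  | succ n ih =>
    intro S
    simp only [pvBH, pvHits]
    refine List.Perm.trans ?_ (List.flatMap_append_perm S _ _)
    apply List.Perm.append_left
    have := ih (S.map (pvStep ops tests wld md))
    rw [List.flatMap_map] at this
    simpa [Function.comp] using this


theorem pv_B_rounds (ops : List (String × Int)) (tests : List (List Int)) (wld md : Int)
    (hT : ∀ p ∈ PySem.List.enumerate tests 0,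
        p.2.getD 0 0 ≠ 0 ∧
        (p.2.getD 1 0 < p.1 ∨ (p.1 < p.2.getD 1 0 ∧ p.2.getD 1 0 < (min ops.length tests.length : Int))) ∧
        (p.2.getD 2 0 < p.1 ∨ (p.1 < p.2.getD 2 0 ∧ p.2.getD 2 0 < (min ops.length tests.length : Int)))) :
    ∀ (l : List Int) (S : List (Int × Int)) (c : List Int),
      (∀ s ∈ S, 0 ≤ s.2 → s.2 < (min ops.length tests.length : Int)) →
      c.length = ops.length →
      l.foldl (fun (sc : List (Int × Int) × List Int) _ =>
        ((sc.1.foldl (fun (acc : List (Int × Int) × List Int) wm =>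
            (acc.1 ++ [((mbChain ops tests wld (wld * md) (ops.length + 1) 0 wm.2 wm.1).1,
                        (mbChain ops tests wld (wld * md) (ops.length + 1) 0 wm.2 wm.1).2.1)],
             acc.2 ++ (mbChain ops tests wld (wld * md) (ops.length + 1) 0 wm.2 wm.1).2.2)) ([], [])).1,
         (PySem.List.enumerate sc.2 0).map (fun ic => ic.2 +
           (((sc.1.foldl (fun (acc : List (Int × Int) × List Int) wm =>
            (acc.1 ++ [((mbChain ops tests wld (wld * md) (ops.length + 1) 0 wm.2 wm.1).1,
                        (mbChain ops tests wld (wld * md) (ops.length + 1) 0 wm.2 wm.1).2.1)],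
             acc.2 ++ (mbChain ops tests wld (wld * md) (ops.length + 1) 0 wm.2 wm.1).2.2)) ([], [])).2).count ic.1 : Int)))) (S, c)
      = (pvIterL ops tests wld md l.length S, (pvBH ops tests wld md l.length S).foldl pvBump c) := by
  intro l
  induction l with
  | nil => intro S c _ _; rfl
  | cons a l ih =>
    intro S c hS hc
    simp only [List.foldl_cons]
    rw [pv_B_inner ops tests wld md S [] []]
    simp only [List.nil_append]
    have hrange : ∀ x ∈ S.flatMap (pvVis ops tests wld md), 0 ≤ x ∧ x < (c.length : Int) := by
      intro x hx
      have := pv_flat_range ops tests wld md hT S hS x hx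
      constructor
      · exact this.1
      · have hle : (min ops.length tests.length : Int) ≤ (c.length : Int) := by
          rw [hc]; omega
        omega
    rw [pv_countMap_eq_bump _ _ hrange]
    rw [ih (S.map (pvStep ops tests wld md)) _ (pv_step_range ops tests wld md hT S hS)
      (by rw [pv_bump_foldl_length, hc])]
    simp only [pvBH, List.length_cons, pvIterL, List.foldl_append]

theorem pv_b_empty (ops : List (String × Int)) (tests : List (List Int)) (wld md : Int) :
    ∀ (l : List Int) (c : List Int),
      l.foldl (fun (sc : List (Int × Int) × List Int) _ =>
        ((sc.1.foldl (fun (acc : List (Int × Int) × List Int) wm =>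
            (acc.1 ++ [((mbChain ops tests wld (wld * md) (ops.length + 1) 0 wm.2 wm.1).1,
                        (mbChain ops tests wld (wld * md) (ops.length + 1) 0 wm.2 wm.1).2.1)],
             acc.2 ++ (mbChain ops tests wld (wld * md) (ops.length + 1) 0 wm.2 wm.1).2.2)) ([], [])).1,
         (PySem.List.enumerate sc.2 0).map (fun ic => ic.2 +
           (((sc.1.foldl (fun (acc : List (Int × Int) × List Int) wm =>
            (acc.1 ++ [((mbChain ops tests wld (wld * md) (ops.length + 1) 0 wm.2 wm.1).1,
                        (mbChain ops tests wld (wld * md) (ops.length + 1) 0 wm.2 wm.1).2.1)],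
             acc.2 ++ (mbChain ops tests wld (wld * md) (ops.length + 1) 0 wm.2 wm.1).2.2)) ([], [])).2).count ic.1 : Int)))) ([], c)
      = ([], c) := by
    intro l
    induction l with
    | nil => intro c; rfl
    | cons a l ih =>
      intro c
      simp only [List.foldl_cons, List.foldl_nil]
      rw [show ((PySem.List.enumerate c 0).map fun ic => ic.2 + ((([] : List Int).count ic.1 : Int))) = c by
        simp [PySem.List.map_snd_enumerate]]
      exact ih c

theorem pv_init (ops : List (String × Int)) :
    ops.map (fun _ => (0 : Int)) = PySem.List.pyRepeat [(0 : Int)] (ops.length : Int) := by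
  rw [PySem.List.pyRepeat_singleton]
  simp [List.map_const']

theorem pv_top2 (c : List Int) :
    (PySem.List.slice (PySem.List.sorted c (fun x => x) false) (some (-2)) none).prod
      = (PySem.List.slice (PySem.List.sorted c (fun x => x) true) none (some 2)).prod := by
  have hdesc : PySem.List.sorted c (fun x => x) true
      = (PySem.List.sorted c (fun x => x) false).reverse := by
    apply PySem.List.eq_of_perm_of_pairwise_le_of_injective (fun x : Int => -x)
    · intro a b h; simpa using h
    · exact (PySem.List.sorted_perm c _ true).trans
        ((List.reverse_perm _).trans (PySem.List.sorted_perm c _ false)).symm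
    · exact (PySem.List.sorted_pairwise_rev c (fun x => x)).imp (by intro a b h; simpa using h)
    · rw [List.pairwise_reverse]
      exact (PySem.List.sorted_pairwise c (fun x => x)).imp (by intro a b h; simpa using h)
  rw [hdesc, PySem.List.slice_to _ (by norm_num : (0:Int) ≤ 2)]
  rw [PySem.List.slice_from_neg_ofNat _ 2 (by norm_num)]
  rw [List.take_reverse, List.prod_reverse]
  have : ((2:Int)).toNat = 2 := rfl
  rw [this]


theorem pv_foldl_const {α β : Type} : ∀ (L : List α) (c : β), L.foldl (fun c _ => c) c = c := by
  intro L
  induction L with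
  | nil => intro c; rfl
  | cons a L ih => intro c; simp only [List.foldl_cons]; exact ih c

theorem pv_BH_range (ops : List (String × Int)) (tests : List (List Int)) (wld md : Int)
    (hT : ∀ p ∈ PySem.List.enumerate tests 0,
        p.2.getD 0 0 ≠ 0 ∧
        (p.2.getD 1 0 < p.1 ∨ (p.1 < p.2.getD 1 0 ∧ p.2.getD 1 0 < (min ops.length tests.length : Int))) ∧
        (p.2.getD 2 0 < p.1 ∨ (p.1 < p.2.getD 2 0 ∧ p.2.getD 2 0 < (min ops.length tests.length : Int)))) :
    ∀ (n : Nat) (S : List (Int × Int)),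
      (∀ s ∈ S, 0 ≤ s.2 → s.2 < (min ops.length tests.length : Int)) →
      ∀ h ∈ pvBH ops tests wld md n S, 0 ≤ h ∧ h < (min ops.length tests.length : Int) := by
  intro n
  induction n with
  | zero => intro S _ h hh; simp [pvBH] at hh
  | succ n ih =>
    intro S hS h hh
    simp only [pvBH, List.mem_append] at hh
    rcases hh with hh | hh
    · exact pv_flat_range ops tests wld md hT S hS h hh
    · exact ih (S.map (pvStep ops tests wld md)) (pv_step_range ops tests wld md hT S hS) h hh

theorem pv_repeat_length (ops : List (String × Int)) :
    (PySem.List.pyRepeat [(0 : Int)] (ops.length : Int)).length = ops.length := by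
  rw [PySem.List.pyRepeat_singleton]
  simp

-- ===== VERDICT (by name: the statement is the Claim_ definition above) =====
theorem monkey_business_spec : Claim_equal_monkey_business := by
  unfold Claim_equal_monkey_business
  intro items ops tests rounds wld _ hpre
  obtain ⟨hlen3, hbr⟩ := hpre
  unfold Spec_monkey_business monkey_business monkey_business_alt
  simp only []
  rcases hbr with rfl | hneg | hvalid
  · -- items = []
    rw [List.foldl_nil,
      pv_b_empty ops tests wld ((tests.map (fun t => PySem.List.pyGetD t 0 0)).prod),
      pv_init ops]
    exact pv_top2 _
  · -- rounds ≤ 0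
    rw [PySem.List.pyRange_one_eq_nil hneg]
    simp only [List.foldl_nil]
    rw [pv_foldl_const, pv_init ops]
    exact pv_top2 _
  · obtain ⟨hdiv, hops, hT, hitems⟩ := hvalid
    rw [pv_A_insp ops tests wld ((tests.map (fun t => PySem.List.pyGetD t 0 0)).prod)
      (PySem.List.pyRange 0 rounds 1) items (ops.map fun _ => (0 : Int))]
    rw [pv_B_rounds ops tests wld ((tests.map (fun t => PySem.List.pyGetD t 0 0)).prod) hT
      (PySem.List.pyRange 0 rounds 1) items _ hitems (pv_repeat_length ops)]
    rw [pv_init ops]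
    have hperm : _ := (pv_BH_perm ops tests wld ((tests.map (fun t => PySem.List.pyGetD t 0 0)).prod)
      (PySem.List.pyRange 0 rounds 1).length items).symm
    have hr : ∀ x ∈ items.flatMap (pvHits ops tests wld ((tests.map (fun t => PySem.List.pyGetD t 0 0)).prod) (PySem.List.pyRange 0 rounds 1).length),
        0 ≤ x ∧ x < ((PySem.List.pyRepeat [(0 : Int)] (ops.length : Int)).length : Int) := by
      intro x hx
      have hx2 : x ∈ pvBH ops tests wld ((tests.map (fun t => PySem.List.pyGetD t 0 0)).prod)
          (PySem.List.pyRange 0 rounds 1).length items := hperm.subset hx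
      have := pv_BH_range ops tests wld ((tests.map (fun t => PySem.List.pyGetD t 0 0)).prod) hT
        (PySem.List.pyRange 0 rounds 1).length items hitems x hx2
      rw [pv_repeat_length ops]
      have hle : (min ops.length tests.length : Int) ≤ (ops.length : Int) := by omega
      exact ⟨this.1, by omega⟩
    rw [pv_bump_perm _ _ _ hperm hr]
    exact pv_top2 _
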